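-- pv_equiv track=rewrite | github.com/dank02az/intro-programacion-2023-c2 | Guias/Soluciones/Guia7.py | movimientosBancarios
-- ===== SOURCE A (Python) =====
-- def movimientosBancarios(movimientos: list) -> int:
--     saldo: int = 0
--     for (operacion,monto) in movimientos:
--         if operacion == "I" :
--             saldo+= monto
--         if operacion == "R" :
--             saldo-= monto
--     return saldo
-- ===== SOURCE B (Python) =====
-- def movimientosBancarios(movimientos: list) -> int:
--     depositos = sum(monto for (op, monto) in movimientos if op == "I")
--     retiros = sum(monto for (op, monto) in movimientos if op == "R")
--     return depositos - retiros
-- ===== Notes on version B (the rewrite author's own statement) =====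
-- stated objective: simpler
-- what changed: Replaces the single running-balance loop with two grouped aggregates: sum of 'I' amounts minus sum of 'R' amounts, computed by filter-and-sum passes.
import Mathlib
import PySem

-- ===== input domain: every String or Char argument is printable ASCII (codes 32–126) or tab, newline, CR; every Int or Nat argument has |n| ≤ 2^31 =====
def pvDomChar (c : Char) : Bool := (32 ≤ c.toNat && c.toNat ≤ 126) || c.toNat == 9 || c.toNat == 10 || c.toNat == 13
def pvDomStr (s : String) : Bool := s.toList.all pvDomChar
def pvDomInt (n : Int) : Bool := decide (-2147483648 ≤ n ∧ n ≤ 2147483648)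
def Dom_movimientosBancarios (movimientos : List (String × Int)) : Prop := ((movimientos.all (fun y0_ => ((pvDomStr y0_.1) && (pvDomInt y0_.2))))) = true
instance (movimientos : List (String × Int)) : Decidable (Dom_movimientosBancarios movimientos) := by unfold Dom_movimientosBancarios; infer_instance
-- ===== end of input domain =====

-- B computes deposits and withdrawals as two grouped sums and subtracts (simpler decomposition).
-- ===== PORT A =====
def movimientosBancarios (movimientos : List (String × Int)) : Int :=
  movimientos.foldl (fun saldo om =>
    let saldo1 := if om.1 == "I" then saldo + om.2 else saldo
    if om.1 == "R" then saldo1 - om.2 else saldo1) 0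

-- ===== PORT B =====
def movimientosBancarios_alt (movimientos : List (String × Int)) : Int :=
  ((movimientos.filter (fun om => om.1 == "I")).map (·.2)).sum
    - ((movimientos.filter (fun om => om.1 == "R")).map (·.2)).sum

-- ===== PRECONDITION & SPEC =====
def Spec_movimientosBancarios (movimientos : List (String × Int)) (out : Int) : Prop := out = movimientosBancarios_alt movimientos
instance (movimientos : List (String × Int)) (out : Int) : Decidable (Spec_movimientosBancarios movimientos out) := by unfold Spec_movimientosBancarios; infer_instance

-- ===== CLAIM (what is proved, stated in full; the proofs are below) =====
def Claim_equal_movimientosBancarios : Prop := ∀ (movimientos : List (String × Int)), Dom_movimientosBancarios movimientos → Spec_movimientosBancarios movimientos (movimientosBancarios movimientos)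

-- ===== LEMMAS AND PROOFS =====

-- ===== VERDICT (by name: the statement is the Claim_ definition above) =====
theorem pv_foldl_shift (ms : List (String × Int)) (s : Int) :
    ms.foldl (fun saldo om =>
      let saldo1 := if om.1 == "I" then saldo + om.2 else saldo
      if om.1 == "R" then saldo1 - om.2 else saldo1) s
    = s + movimientosBancarios_alt ms := by
  induction ms generalizing s with
  | nil => simp [movimientosBancarios_alt]
  | cons h t ih =>
    simp only [List.foldl_cons, ih, movimientosBancarios_alt, List.filter_cons]
    by_cases hI : h.1 == "I" <;> by_cases hR : h.1 == "R" <;>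
      simp_all <;> ring

theorem movimientosBancarios_spec : Claim_equal_movimientosBancarios := by
  intro ms _
  unfold Spec_movimientosBancarios movimientosBancarios
  rw [pv_foldl_shift]
  ring
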